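-- pv_equiv track=rewrite | github.com/SatoryKono/ChEMBL_dataAcquisition | tests/test_io_utils.py | _parse_pipe
-- ===== SOURCE A (Python) =====
-- from typing import Any, Iterable
--
-- def _parse_pipe(value: str) -> Iterable[str]:
--     r"""Parse a pipe-delimited string produced by ``_serialise_list``.
--
--     This function splits on unescaped pipes and unescapes ``\|`` sequences.
--     """
--
--     result = []
--     current = []
--     escape = False
--     for ch in value:
--         if escape:
--             if ch not in ("|", "\\"):
--                 current.append("\\")
--             current.append(ch)
--             escape = False
--             continue
--         if ch == "\\":
--             escape = True
--             continue
--         if ch == "|":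
--             result.append("".join(current))
--             current = []
--             continue
--         current.append(ch)
--     if escape:
--         current.append("\\")
--     result.append("".join(current))
--     return result
-- ===== SOURCE B (Python) =====
-- def _parse_pipe(value):
--     """Parse a pipe-delimited string: lex into tokens, then reduce."""
--     # Phase 1: lex into tokens: a backslash grabs the following char ("\x"),
--     # a trailing lone backslash stays a one-char token, everything else is one char.
--     tokens = []
--     i = 0
--     n = len(value)
--     while i < n:
--         if value[i] == "\\" and i + 1 < n:
--             tokens.append(value[i:i + 2])
--             i += 2
--         else:
--             tokens.append(value[i])
--             i += 1
--     # Phase 2: reduce the token stream into segments.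
--     segments = []
--     cur = []
--     for t in tokens:
--         if t == "|":
--             segments.append("".join(cur))
--             cur = []
--         elif len(t) == 2:
--             c = t[1]
--             cur.append(c if c in ("|", "\\") else t)
--         else:
--             cur.append(t)
--     segments.append("".join(cur))
--     return segments
-- ===== Notes on version B (the rewrite author's own statement) =====
-- stated objective: alternative
-- what changed: Replaces the single-pass escape-flag state machine with a two-phase lex-then-reduce pipeline: first materialise a token list (escape pairs, lone trailing backslash, plain chars), then fold the tokens into segments.
import Mathlib
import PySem

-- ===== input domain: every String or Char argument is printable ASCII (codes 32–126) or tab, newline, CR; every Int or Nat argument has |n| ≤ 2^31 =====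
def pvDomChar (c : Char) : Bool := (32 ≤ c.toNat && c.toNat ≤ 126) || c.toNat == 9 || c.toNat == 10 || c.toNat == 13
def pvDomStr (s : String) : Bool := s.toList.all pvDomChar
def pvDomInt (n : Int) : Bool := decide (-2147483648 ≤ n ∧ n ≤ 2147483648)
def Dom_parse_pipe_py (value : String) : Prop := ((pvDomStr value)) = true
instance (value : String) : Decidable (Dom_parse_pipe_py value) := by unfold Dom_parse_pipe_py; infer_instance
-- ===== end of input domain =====

-- B replaces A's single-pass escape-flag state machine by a two-phase
-- lex-then-reduce pipeline over a materialised token list (objective: alternative).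

-- ===== PORT A =====
-- the for-loop over `value` with state (result, current, escape), plus the trailing flush
def parseA_go : List Char → List String → List Char → Bool → List String
  | [], result, current, escape =>
      result ++ [String.mk (if escape then current ++ ['\\'] else current)]
  | ch :: rest, result, current, escape =>
      if escape then
        parseA_go rest result
          ((if ¬(ch = '|' ∨ ch = '\\') then current ++ ['\\'] else current) ++ [ch]) false
      else if ch = '\\' then parseA_go rest result current true
      else if ch = '|' then parseA_go rest (result ++ [String.mk current]) [] false
      else parseA_go rest result (current ++ [ch]) false

def parse_pipe_py (value : String) : List String :=
  parseA_go value.toList [] [] false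

-- ===== PORT B =====
-- phase 1: the while-loop lexer (an escape pair is one two-char token)
def parseB_tokenize : List Char → List (List Char)
  | [] => []
  | c :: rest =>
      if c = '\\' then
        match rest with
        | [] => [c] :: parseB_tokenize []
        | c2 :: rest2 => [c, c2] :: parseB_tokenize rest2
      else [c] :: parseB_tokenize rest

-- phase 2: the for-loop reducer over the token stream with state (segments, cur)
def parseB_reduce : List (List Char) → List String → List Char → List String
  | [], segments, cur => segments ++ [String.mk cur]
  | t :: ts, segments, cur =>
      if t = ['|'] then parseB_reduce ts (segments ++ [String.mk cur]) []
      else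
        match t with
        | [_, c] =>
            if c = '|' ∨ c = '\\' then parseB_reduce ts segments (cur ++ [c])
            else parseB_reduce ts segments (cur ++ t)
        | _ => parseB_reduce ts segments (cur ++ t)

def parse_pipe_py_alt (value : String) : List String :=
  parseB_reduce (parseB_tokenize value.toList) [] []

-- ===== PRECONDITION & SPEC =====
def Spec_parse_pipe_py (value : String) (out : List String) : Prop := out = parse_pipe_py_alt value
instance (value : String) (out : List String) : Decidable (Spec_parse_pipe_py value out) := by unfold Spec_parse_pipe_py; infer_instance

-- ===== CLAIM (what is proved, stated in full; the proofs are below) =====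
def Claim_equal_parse_pipe_py : Prop := ∀ (value : String), Dom_parse_pipe_py value → Spec_parse_pipe_py value (parse_pipe_py value)

-- ===== LEMMAS AND PROOFS =====

lemma parse_pipe_main (n : ℕ) :
    ∀ (chars : List Char), chars.length ≤ n → ∀ (res : List String) (cur : List Char),
      parseA_go chars res cur false = parseB_reduce (parseB_tokenize chars) res cur := by
  induction n with
  | zero =>
    intro chars hlen res cur
    have : chars = [] := List.length_eq_zero_iff.mp (Nat.le_zero.mp hlen)
    subst this
    simp [parseA_go, parseB_tokenize, parseB_reduce]
  | succ n ih =>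
    intro chars hlen res cur
    have hf : ¬ (false = true) := by decide
    match chars with
    | [] => simp [parseA_go, parseB_tokenize, parseB_reduce]
    | c :: rest =>
      by_cases hc : c = '\\'
      · subst hc
        match rest with
        | [] => simp [parseA_go, parseB_tokenize, parseB_reduce]
        | c2 :: rest2 =>
          have hlen2 : rest2.length ≤ n := by
            simpa using Nat.le_of_succ_le_succ (Nat.le_of_succ_le hlen)
          have hne : ¬ ([('\\' : Char), c2] = ['|']) := by simp
          rw [parseA_go, if_neg hf, if_pos rfl, parseA_go, if_pos rfl,
              parseB_tokenize, if_pos rfl, parseB_reduce, if_neg hne]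
          by_cases h2 : c2 = '|' ∨ c2 = '\\'
          · rw [if_neg (not_not_intro h2), if_pos h2]
            exact ih rest2 hlen2 res (cur ++ [c2])
          · rw [if_pos h2, if_neg h2]
            have : cur ++ ['\\'] ++ [c2] = cur ++ ['\\', c2] := by simp
            rw [this]
            exact ih rest2 hlen2 res (cur ++ ['\\', c2])
      · have hlen1 : rest.length ≤ n := Nat.le_of_succ_le_succ hlen
        by_cases hp : c = '|'
        · subst hp
          have ht : parseB_tokenize ('|' :: rest) = ['|'] :: parseB_tokenize rest := by
            rw [parseB_tokenize.eq_def]; simp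
          rw [parseA_go, if_neg hf, if_neg hc, if_pos rfl,
              ht, parseB_reduce, if_pos rfl]
          · exact ih rest hlen1 (res ++ [String.mk cur]) []
          all_goals simp
        · have hne : ¬ ([c] = ['|']) := by simp [hp]
          have ht : parseB_tokenize (c :: rest) = [c] :: parseB_tokenize rest := by
            rw [parseB_tokenize.eq_def]; simp [hc]
          rw [parseA_go, if_neg hf, if_neg hc, if_neg hp,
              ht, parseB_reduce, if_neg hne,
              ih rest hlen1 res (cur ++ [c])]
          all_goals simp

-- ===== VERDICT (by name: the statement is the Claim_ definition above) =====
theorem parse_pipe_py_spec : Claim_equal_parse_pipe_py := by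
  intro value _
  unfold Spec_parse_pipe_py parse_pipe_py parse_pipe_py_alt
  exact parse_pipe_main value.toList.length value.toList le_rfl [] []
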